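-- pv_equiv track=rewrite | github.com/manishamrutkar/macro-regime-engine | python_engine/rag_engine.py | _extractive_answer
-- ===== SOURCE A (Python) =====
-- def _extractive_answer(question: str, context: str) -> str:
--     """Simple extractive answer when no LLM is available."""
--     sentences = [s.strip() for s in context.split('.') if len(s.strip()) > 30]
--     q_words   = set(question.lower().split())
--     scored    = []
--     for sent in sentences:
--         s_words = set(sent.lower().split())
--         overlap = len(q_words & s_words)
--         if overlap > 0:
--             scored.append((overlap, sent))
--     scored.sort(reverse=True)
--     if scored:
--         top = [s[1] for s in scored[:3]]
--         return ". ".join(top) + "."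
--     return "Based on the available data, " + sentences[0] if sentences else "Please ask about macro regimes, risk metrics, or asset allocation strategies."
-- ===== SOURCE B (Python) =====
-- def _extractive_answer(question: str, context: str) -> str:
--     """Extractive answer: same scoring, but a bounded top-3 insertion instead of a full sort."""
--     sentences = [s.strip() for s in context.split('.') if len(s.strip()) > 30]
--     q_words = set(question.lower().split())
--     top = []  # at most 3 best (overlap, sent) tuples, kept in descending tuple order
--     for sent in sentences:
--         overlap = len(q_words & set(sent.lower().split()))
--         if overlap > 0:
--             i = 0
--             while i < len(top) and top[i] >= (overlap, sent):
--                 i += 1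
--             top.insert(i, (overlap, sent))
--             if len(top) > 3:
--                 top.pop()
--     if top:
--         return ". ".join(s for _, s in top) + "."
--     return "Based on the available data, " + sentences[0] if sentences else "Please ask about macro regimes, risk metrics, or asset allocation strategies."
-- ===== Notes on version B (the rewrite author's own statement) =====
-- stated objective: alternative
-- what changed: B replaces A's build-the-whole-scored-list / full sort(reverse=True) / slice-[:3] with a single pass that maintains only the best 3 (overlap, sentence) tuples via bounded insertion (scan-insert-pop), leaving the scoring and both fallback branches unchanged.
import Mathlib
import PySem

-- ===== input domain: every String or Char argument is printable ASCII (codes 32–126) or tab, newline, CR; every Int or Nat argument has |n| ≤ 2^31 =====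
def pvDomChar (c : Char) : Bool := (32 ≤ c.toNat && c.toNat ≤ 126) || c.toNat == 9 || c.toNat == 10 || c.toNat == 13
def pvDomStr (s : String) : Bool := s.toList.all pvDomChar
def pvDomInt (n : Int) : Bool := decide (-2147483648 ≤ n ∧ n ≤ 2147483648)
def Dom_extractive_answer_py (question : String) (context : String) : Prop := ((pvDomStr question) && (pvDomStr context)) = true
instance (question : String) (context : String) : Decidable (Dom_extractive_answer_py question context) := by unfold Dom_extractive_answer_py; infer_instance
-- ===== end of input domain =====

-- B replaces A's build-all / full sort / slice-[:3] of scored sentences by a single pass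
-- maintaining only the best 3 (bounded insertion); same scoring and fallbacks (objective: alternative).

-- ===== PORT A =====
def extractive_answer_py (question : String) (context : String) : String :=
  let sentences :=
    (((PySem.Str.split? context ".").getD []).filter
        (fun s => 30 < PySem.Str.len (PySem.Str.strip s))).map (fun s => PySem.Str.strip s)
  let q_words : PySem.Set String := PySem.Set.ofList (PySem.Str.split₀ (PySem.Str.lower question))
  let scored : List (Int × String) :=
    sentences.foldl (fun acc sent =>
      let s_words : PySem.Set String := PySem.Set.ofList (PySem.Str.split₀ (PySem.Str.lower sent))
      let overlap : Int := PySem.Set.len (PySem.Set.inter q_words s_words)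
      if 0 < overlap then acc ++ [(overlap, sent)] else acc) []
  let scored := PySem.List.sorted2 scored (fun p => p.1) (fun p => p.2) true
  if scored ≠ [] then
    let top := (PySem.List.slice scored none (some 3)).map (fun p => p.2)
    -- '+ "."' ported by hand on toList (exact string concatenation)
    String.ofList ((PySem.Str.join ". " top).toList ++ ['.'])
  else if sentences ≠ [] then
    String.ofList ("Based on the available data, ".toList ++ sentences.headI.toList)
  else "Please ask about macro regimes, risk metrics, or asset allocation strategies."

-- ===== PORT B =====
-- Source B's while-loop scan + insert: recurse past every kept element y with y >= x (Python tuple order),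
-- place x there; the caller's 'pop if len > 3' is '.take 3'.
def pvTopInsert (x : Int × String) : List (Int × String) → List (Int × String)
  | [] => [x]
  | y :: ys =>
    if decide (x.1 < y.1) || (decide (y.1 = x.1) && decide (x.2 ≤ y.2)) then y :: pvTopInsert x ys
    else x :: y :: ys

def extractive_answer_py_alt (question : String) (context : String) : String :=
  let sentences :=
    (((PySem.Str.split? context ".").getD []).map (fun s => PySem.Str.strip s)).filter
      (fun s => 30 < PySem.Str.len s)
  let q_words : PySem.Set String := PySem.Set.ofList (PySem.Str.split₀ (PySem.Str.lower question))
  let top : List (Int × String) :=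
    sentences.foldl (fun top sent =>
      let overlap : Int :=
        PySem.Set.len (PySem.Set.inter q_words (PySem.Set.ofList (PySem.Str.split₀ (PySem.Str.lower sent))))
      if 0 < overlap then (pvTopInsert (overlap, sent) top).take 3 else top) []
  match top with
  | [] =>
    if sentences ≠ [] then
      String.ofList ("Based on the available data, ".toList ++ sentences.headI.toList)
    else "Please ask about macro regimes, risk metrics, or asset allocation strategies."
  | _ => String.ofList ((PySem.Str.join ". " (top.map (fun p => p.2))).toList ++ ['.'])

-- ===== PRECONDITION & SPEC =====
def Spec_extractive_answer_py (question : String) (context : String) (out : String) : Prop := out = extractive_answer_py_alt question context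
instance (question : String) (context : String) (out : String) : Decidable (Spec_extractive_answer_py question context out) := by unfold Spec_extractive_answer_py; infer_instance

-- ===== CLAIM (what is proved, stated in full; the proofs are below) =====
def Claim_equal_extractive_answer_py : Prop := ∀ (question : String) (context : String), Dom_extractive_answer_py question context → Spec_extractive_answer_py question context (extractive_answer_py question context)

-- ===== LEMMAS AND PROOFS =====

-- the comparator sorted2 (reverse := true) inserts with
def pvBefore (x y : Int × String) : Bool :=
  decide (y.1 < x.1) || (!decide (x.1 < y.1) && decide (y.2 < x.2))

theorem pvGuard_eq (x y : Int × String) :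
    (decide (x.1 < y.1) || (decide (y.1 = x.1) && decide (x.2 ≤ y.2))) = !pvBefore x y := by
  simp only [pvBefore]
  rcases lt_trichotomy x.1 y.1 with h | h | h
  · simp [h, lt_asymm h]
  · rcases lt_trichotomy x.2.toList y.2.toList with h2 | h2 | h2
    · simp [h, h2, le_iff_lt_or_eq, lt_asymm h2]
    · have he : x.2 = y.2 := String.toList_inj.mp h2
      simp [h, he]
    · have hne : x.2 ≠ y.2 := by intro e; rw [e] at h2; exact lt_irrefl _ h2
      simp [h, h2, le_iff_lt_or_eq, lt_asymm h2, hne]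
  · simp [h, lt_asymm h, ne_of_lt h]

theorem pvTopInsert_eq_insertBy (x : Int × String) (l : List (Int × String)) :
    pvTopInsert x l = PySem.List.insertBy pvBefore x l := by
  induction l with
  | nil => rfl
  | cons y ys ih =>
    simp only [pvTopInsert, PySem.List.insertBy, ih, pvGuard_eq]
    cases pvBefore x y <;> simp

theorem pvTake_cons_take {α : Type} (y : α) (ys : List α) (m : Nat) :
    List.take m (y :: ys) = List.take m (y :: ys.take m) := by
  cases m with
  | zero => simp
  | succ j => simp [List.take_take]

theorem pvTake_insertBy (p : (Int × String) → (Int × String) → Bool) (x : Int × String) :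
    ∀ (k : Nat) (l : List (Int × String)),
      (PySem.List.insertBy p x l).take k = (PySem.List.insertBy p x (l.take k)).take k := by
  intro k l
  induction l generalizing k with
  | nil => simp
  | cons y ys ih =>
    cases k with
    | zero => simp
    | succ m =>
      simp only [List.take_succ_cons, PySem.List.insertBy]
      cases hb : p x y
      · rw [if_neg (by simp), if_neg (by simp)]
        simp only [List.take_succ_cons]
        rw [ih m]
      · rw [if_pos (by simp), if_pos (by simp)]
        simp only [List.take_succ_cons]
        rw [pvTake_cons_take]

-- abbreviation for the proof: fold of insertBy (= sorted2 … true)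
def pvSortIns (zs : List (Int × String)) : List (Int × String) :=
  zs.foldl (fun acc x => PySem.List.insertBy pvBefore x acc) []

theorem pvSortIns_eq_sorted2 (zs : List (Int × String)) :
    PySem.List.sorted2 zs (fun p => p.1) (fun p => p.2) true = pvSortIns zs := rfl

-- fold invariant: B's bounded top-3 fold tracks (take 3) of A's sort-fold of the scored list
theorem pvFold_inv (ov : String → Int) :
    ∀ (sents : List String) (s : List (Int × String)),
      sents.foldl (fun top sent =>
          if 0 < ov sent then (pvTopInsert (ov sent, sent) top).take 3 else top)
        ((pvSortIns s).take 3)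
      = (pvSortIns (sents.foldl (fun acc sent =>
          if 0 < ov sent then acc ++ [(ov sent, sent)] else acc) s)).take 3 := by
  intro sents
  induction sents with
  | nil => intro s; rfl
  | cons sent rest ih =>
    intro s
    simp only [List.foldl_cons]
    by_cases h : 0 < ov sent
    · simp only [h, if_pos]
      have hstep : (pvTopInsert (ov sent, sent) ((pvSortIns s).take 3)).take 3
          = (pvSortIns (s ++ [(ov sent, sent)])).take 3 := by
        rw [pvTopInsert_eq_insertBy, ← pvTake_insertBy]
        simp [pvSortIns]
      rw [hstep, ih]
    · simp only [h, ite_false]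
      exact ih s

theorem pvFold_inv0 (ov : String → Int) (sents : List String) :
    sents.foldl (fun top sent =>
        if 0 < ov sent then (pvTopInsert (ov sent, sent) top).take 3 else top) []
    = (pvSortIns (sents.foldl (fun acc sent =>
        if 0 < ov sent then acc ++ [(ov sent, sent)] else acc) [])).take 3 :=
  pvFold_inv ov sents []

theorem pvWhole (raw : List String) (ov : String → Int) :
    (let sentences := (raw.filter (fun s => 30 < PySem.Str.len (PySem.Str.strip s))).map (fun s => PySem.Str.strip s)
     let scored := sentences.foldl (fun acc sent => if 0 < ov sent then acc ++ [(ov sent, sent)] else acc) ([] : List (Int × String))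
     let scored := PySem.List.sorted2 scored (fun p => p.1) (fun p => p.2) true
     if scored ≠ [] then
       String.ofList ((PySem.Str.join ". " ((PySem.List.slice scored none (some 3)).map (fun p => p.2))).toList ++ ['.'])
     else if sentences ≠ [] then
       String.ofList ("Based on the available data, ".toList ++ sentences.headI.toList)
     else "Please ask about macro regimes, risk metrics, or asset allocation strategies.")
    =
    (let sentences := (raw.map (fun s => PySem.Str.strip s)).filter (fun s => 30 < PySem.Str.len s)
     let top := sentences.foldl (fun top sent => if 0 < ov sent then (pvTopInsert (ov sent, sent) top).take 3 else top) ([] : List (Int × String))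
     match top with
     | [] =>
       if sentences ≠ [] then String.ofList ("Based on the available data, ".toList ++ sentences.headI.toList)
       else "Please ask about macro regimes, risk metrics, or asset allocation strategies."
     | _ => String.ofList ((PySem.Str.join ". " (top.map (fun p => p.2))).toList ++ ['.'])) := by
  have hsent : (raw.filter (fun s => 30 < PySem.Str.len (PySem.Str.strip s))).map (fun s => PySem.Str.strip s)
      = (raw.map (fun s => PySem.Str.strip s)).filter (fun s => 30 < PySem.Str.len s) := by
    rw [List.filter_map, Function.comp_def]
  simp only [hsent]
  rw [pvFold_inv0 ov]
  rw [pvSortIns_eq_sorted2]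
  cases hs : pvSortIns (((raw.map (fun s => PySem.Str.strip s)).filter
      (fun s => 30 < PySem.Str.len s)).foldl
      (fun acc sent => if 0 < ov sent then acc ++ [(ov sent, sent)] else acc) []) with
  | nil => simp
  | cons a as =>
    simp only [List.take_succ_cons, ne_eq, reduceCtorEq, not_false_eq_true, if_true]
    rw [PySem.List.slice_to _ (by norm_num : (0:Int) ≤ 3)]
    rfl

-- ===== VERDICT (by name: the statement is the Claim_ definition above) =====
theorem extractive_answer_py_spec : Claim_equal_extractive_answer_py := by
  intro question context _
  show extractive_answer_py question context = extractive_answer_py_alt question context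
  exact pvWhole ((PySem.Str.split? context ".").getD [])
    (fun sent => PySem.Set.len (PySem.Set.inter
      (PySem.Set.ofList (PySem.Str.split₀ (PySem.Str.lower question)))
      (PySem.Set.ofList (PySem.Str.split₀ (PySem.Str.lower sent)))))
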